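-- pv_equiv track=rewrite | github.com/trgkanki/cloze_hide_all | src/applyClozeHide.py | transform_concatAdjacentData
-- ===== SOURCE A (Python) =====
-- def transform_concatAdjacentData(chunks):
--     newChunks = []
--     for chunk in chunks:
--         if chunk[0] == "raw" and newChunks and newChunks[-1][0] == "raw":
--             newChunks[-1] = ("raw", newChunks[-1][1] + chunk[1])
--         else:
--             newChunks.append(chunk)
--
--     return newChunks
-- ===== SOURCE B (Python) =====
-- def transform_concatAdjacentData(chunks):
--     # Two-pointer run scanner: each maximal run of "raw" chunks is collapsed
--     # in one inner scan; non-raw chunks are copied through.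
--     result = []
--     i, n = 0, len(chunks)
--     while i < n:
--         chunk = chunks[i]
--         if chunk[0] == "raw":
--             combined = chunk[1]
--             i += 1
--             while i < n and chunks[i][0] == "raw":
--                 combined = combined + chunks[i][1]
--                 i += 1
--             result.append(("raw", combined))
--         else:
--             result.append(chunk)
--             i += 1
--     return result
-- ===== Notes on version B (the rewrite author's own statement) =====
-- stated objective: alternative
-- what changed: Replaces A's append-or-rewrite-last-element accumulator loop by a two-pointer run scanner that consumes each maximal run of adjacent 'raw' chunks in an inner scan and emits one merged chunk per run.
import Mathlib
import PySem

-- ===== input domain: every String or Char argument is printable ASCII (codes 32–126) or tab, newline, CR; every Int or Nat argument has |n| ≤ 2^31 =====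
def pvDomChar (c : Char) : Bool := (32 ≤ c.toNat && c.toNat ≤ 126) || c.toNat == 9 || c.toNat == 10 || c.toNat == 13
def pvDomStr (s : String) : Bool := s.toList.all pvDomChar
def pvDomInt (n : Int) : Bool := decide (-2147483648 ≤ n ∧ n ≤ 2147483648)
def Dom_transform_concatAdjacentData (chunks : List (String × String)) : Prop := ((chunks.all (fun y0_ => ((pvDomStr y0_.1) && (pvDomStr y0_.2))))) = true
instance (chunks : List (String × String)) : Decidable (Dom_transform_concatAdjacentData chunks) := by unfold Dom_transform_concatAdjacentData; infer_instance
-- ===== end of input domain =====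

-- B replaces A's append-or-rewrite-last accumulator loop by a two-pointer run
-- scanner that collapses each maximal run of adjacent "raw" chunks (alternative
-- decomposition, same asymptotic cost).


-- ===== PORT A =====
-- one iteration of A's loop: merge into the last accumulated chunk or append
def aStep (acc : List (String × String)) (chunk : String × String) : List (String × String) :=
  match acc.getLast? with
  | some lastc =>
      if chunk.1 == "raw" && lastc.1 == "raw" then
        acc.dropLast ++ [("raw", lastc.2 ++ chunk.2)]
      else
        acc ++ [chunk]
  | none => acc ++ [chunk]

def transform_concatAdjacentData (chunks : List (String × String)) : List (String × String) :=
  chunks.foldl aStep []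

-- ===== PORT B =====
-- inner while loop: extend `combined` over the leading run of "raw" chunks,
-- returning the combined string and the remaining suffix
def altCollect (combined : String) : List (String × String) → String × List (String × String)
  | [] => (combined, [])
  | c :: rest =>
      if c.1 == "raw" then altCollect (combined ++ c.2) rest
      else (combined, c :: rest)

theorem altCollect_len (l : List (String × String)) :
    ∀ s, (altCollect s l).2.length ≤ l.length := by
  induction l with
  | nil => intro s; simp [altCollect]
  | cons c rest ih =>
      intro s
      by_cases h : c.1 == "raw" <;> simp [altCollect, h]
      · exact Nat.le_succ_of_le (ih _)

def transform_concatAdjacentData_alt : List (String × String) → List (String × String)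
  | [] => []
  | c :: rest =>
      if c.1 == "raw" then
        ("raw", (altCollect c.2 rest).1) :: transform_concatAdjacentData_alt (altCollect c.2 rest).2
      else
        c :: transform_concatAdjacentData_alt rest
termination_by l => l.length
decreasing_by
  · exact Nat.lt_succ_of_le (altCollect_len rest c.2)
  · simp

-- ===== PRECONDITION & SPEC =====
def Spec_transform_concatAdjacentData (chunks : List (String × String)) (out : List (String × String)) : Prop := out = transform_concatAdjacentData_alt chunks
instance (chunks : List (String × String)) (out : List (String × String)) : Decidable (Spec_transform_concatAdjacentData chunks out) := by unfold Spec_transform_concatAdjacentData; infer_instance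

-- ===== CLAIM (what is proved, stated in full; the proofs are below) =====
def Claim_equal_transform_concatAdjacentData : Prop := ∀ (chunks : List (String × String)), Dom_transform_concatAdjacentData chunks → Spec_transform_concatAdjacentData chunks (transform_concatAdjacentData chunks)

-- ===== LEMMAS AND PROOFS =====
-- the accumulator does not end with a "raw" chunk (or is empty)
def AccOK (acc : List (String × String)) : Prop :=
  ∀ x, acc.getLast? = some x → ¬ (x.1 = "raw")

theorem accOK_nil : AccOK [] := by intro x hx; simp at hx

theorem accOK_concat (acc : List (String × String)) (c : String × String)
    (h : ¬ (c.1 = "raw")) : AccOK (acc ++ [c]) := by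
  intro x hx
  rw [List.getLast?_concat] at hx
  cases hx; exact h

theorem aStep_notRaw (acc : List (String × String)) (c : String × String)
    (h : ¬ (c.1 = "raw")) : aStep acc c = acc ++ [c] := by
  unfold aStep
  cases hl : acc.getLast? with
  | none => rfl
  | some lastc => simp [h]

theorem aStep_accOK (acc : List (String × String)) (c : String × String)
    (h : AccOK acc) : aStep acc c = acc ++ [c] := by
  unfold aStep
  cases hl : acc.getLast? with
  | none => rfl
  | some lastc =>
      have := h lastc hl
      simp [this]

-- joint induction on the length of the remaining chunk list:
-- M: with a non-raw-ending accumulator, A's fold appends altGo of the rest;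
-- R: with a trailing ("raw", s), A's fold absorbs the leading raw run like altCollect.
theorem mainInd : ∀ n (l : List (String × String)), l.length ≤ n →
    (∀ acc, AccOK acc → l.foldl aStep acc = acc ++ transform_concatAdjacentData_alt l) ∧
    (∀ s acc, AccOK acc →
      l.foldl aStep (acc ++ [("raw", s)]) =
        acc ++ ("raw", (altCollect s l).1) :: transform_concatAdjacentData_alt (altCollect s l).2) := by
  intro n
  induction n with
  | zero =>
      intro l hl
      have : l = [] := List.length_eq_zero_iff.mp (Nat.le_zero.mp hl)
      subst this
      constructor
      · intro acc _; simp [transform_concatAdjacentData_alt]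
      · intro s acc _; simp [altCollect, transform_concatAdjacentData_alt]
  | succ n ih =>
      intro l hl
      cases l with
      | nil =>
          constructor
          · intro acc _; simp [transform_concatAdjacentData_alt]
          · intro s acc _; simp [altCollect, transform_concatAdjacentData_alt]
      | cons c rest =>
          have hr : rest.length ≤ n := Nat.le_of_succ_le_succ hl
          constructor
          · intro acc hacc
            by_cases h : c.1 = "raw"
            · have hc : c = ("raw", c.2) := by
                cases c with | mk a b => simp at h; simp [h]
              rw [List.foldl_cons, aStep_accOK acc c hacc]
              rw [hc]
              rw [(ih rest hr).2 c.2 acc hacc]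
              have : transform_concatAdjacentData_alt (c :: rest) =
                  ("raw", (altCollect c.2 rest).1) :: transform_concatAdjacentData_alt (altCollect c.2 rest).2 := by
                rw [transform_concatAdjacentData_alt]; simp [h]
              rw [← hc, this]
            · rw [List.foldl_cons, aStep_accOK acc c hacc]
              rw [(ih rest hr).1 (acc ++ [c]) (accOK_concat acc c h)]
              have : transform_concatAdjacentData_alt (c :: rest) = c :: transform_concatAdjacentData_alt rest := by
                rw [transform_concatAdjacentData_alt]; simp [h]
              rw [this, List.append_assoc]
              rfl
          · intro s acc hacc
            by_cases h : c.1 = "raw"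
            · rw [List.foldl_cons]
              have hstep : aStep (acc ++ [("raw", s)]) c = acc ++ [("raw", s ++ c.2)] := by
                unfold aStep
                rw [List.getLast?_concat]
                simp [h]
              rw [hstep, (ih rest hr).2 (s ++ c.2) acc hacc]
              have : altCollect s (c :: rest) = altCollect (s ++ c.2) rest := by
                simp [altCollect, h]
              rw [this]
            · rw [List.foldl_cons, aStep_notRaw _ c h]
              rw [List.append_assoc]
              have hacc' : AccOK (acc ++ ([("raw", s)] ++ [c])) := by
                rw [← List.append_assoc]
                exact accOK_concat _ c h
              rw [(ih rest hr).1 _ hacc']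
              have h1 : altCollect s (c :: rest) = (s, c :: rest) := by
                simp [altCollect, h]
              have h2 : transform_concatAdjacentData_alt (c :: rest) = c :: transform_concatAdjacentData_alt rest := by
                rw [transform_concatAdjacentData_alt]; simp [h]
              rw [h1, h2]
              simp

-- ===== VERDICT (by name: the statement is the Claim_ definition above) =====
theorem transform_concatAdjacentData_spec : Claim_equal_transform_concatAdjacentData := by
  intro chunks _
  unfold Spec_transform_concatAdjacentData transform_concatAdjacentData
  have := (mainInd chunks.length chunks (le_refl _)).1 [] accOK_nil
  simpa using this
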